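-- pv_equiv track=rewrite | github.com/WeilieChen/data-engineer-interview | amazon/questions.py | only_dupe
-- ===== SOURCE A (Python) =====
-- def only_dupe(l):
--     res = []
--     count = {}
--
--     for e in l:
--         if e in count and count[e] == 1:
--             res.append(e)
--         count[e] = count.get(e, 0) + 1
--
--     return res
-- ===== SOURCE B (Python) =====
-- def only_dupe(l):
--     # positions table: element -> list of indices where it occurs
--     pos = {}
--     for i, e in enumerate(l):
--         pos.setdefault(e, []).append(i)
--     # one pair (second_occurrence_index, element) per element seen at least twice;
--     # second-occurrence indices are distinct, so sorting by them restores scan order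
--     pairs = [(idxs[1], e) for e, idxs in pos.items() if len(idxs) >= 2]
--     pairs.sort(key=lambda p: p[0])
--     return [e for _, e in pairs]
-- ===== Notes on version B (the rewrite author's own statement) =====
-- stated objective: alternative
-- what changed: Replaced the single-pass running-count dict (append at count==1) by a positions-table algorithm: one pass records every element's index list, then elements with >= 2 occurrences are emitted sorted by their second-occurrence index.
import Mathlib
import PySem

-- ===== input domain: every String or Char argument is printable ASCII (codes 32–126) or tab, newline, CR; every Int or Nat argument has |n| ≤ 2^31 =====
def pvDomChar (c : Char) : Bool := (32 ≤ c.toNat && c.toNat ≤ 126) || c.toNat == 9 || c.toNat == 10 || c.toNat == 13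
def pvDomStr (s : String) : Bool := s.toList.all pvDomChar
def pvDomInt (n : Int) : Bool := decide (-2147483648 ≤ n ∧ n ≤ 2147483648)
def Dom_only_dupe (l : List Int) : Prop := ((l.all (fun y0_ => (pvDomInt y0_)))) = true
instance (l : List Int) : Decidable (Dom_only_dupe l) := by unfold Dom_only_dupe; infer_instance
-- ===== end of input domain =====

-- B replaces A's running-count scan by a positions table (element -> index list) plus a sort of
-- the (second-occurrence index, element) pairs; alternative algorithm, no speed claim.

-- ===== PORT A =====
def only_dupe (l : List Int) : List Int :=
  (l.foldl
    (fun (st : List Int × PySem.Dict Int Int) e =>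
      let res := if st.2.contains e && st.2.getD e 0 == 1 then st.1 ++ [e] else st.1
      (res, st.2.insert e (st.2.getD e 0 + 1)))
    (([] : List Int), (PySem.Dict.empty : PySem.Dict Int Int))).1

-- ===== PORT B =====
def only_dupe_alt (l : List Int) : List Int :=
  -- pos.setdefault(e, []).append(i)  =  modify with default []
  let pos := (PySem.List.enumerate l 0).foldl
      (fun (d : PySem.Dict Int (List Int)) p => d.modify p.2 [] (· ++ [p.1]))
      PySem.Dict.empty
  -- idxs[1] is in range by the 'len(idxs) >= 2' guard, so it is List.getD 1
  let pairs := (pos.items.filter (fun q => 2 ≤ q.2.length)).map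
      (fun q => (q.2.getD 1 0, q.1))
  (PySem.List.sorted pairs (fun p => p.1)).map (·.2)

-- ===== PRECONDITION & SPEC =====
def Spec_only_dupe (l : List Int) (out : List Int) : Prop := out = only_dupe_alt l
instance (l : List Int) (out : List Int) : Decidable (Spec_only_dupe l out) := by unfold Spec_only_dupe; infer_instance

-- ===== CLAIM (what is proved, stated in full; the proofs are below) =====
def Claim_equal_only_dupe : Prop := ∀ (l : List Int), Dom_only_dupe l → Spec_only_dupe l (only_dupe l)

-- ===== LEMMAS AND PROOFS =====

-- common specification: elements `rest` contributes after the prefix `pfx` has been seen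
def odSpec (pfx rest : List Int) : List Int :=
  match rest with
  | [] => []
  | e :: rest => (if pfx.count e = 1 then [e] else []) ++ odSpec (pfx ++ [e]) rest

-- the second-occurrence positions, in scan order: entries (i, e) of enumerate(l) with l[:i].count(e) == 1
def odT (l : List Int) : List (Int × Int) :=
  (PySem.List.enumerate l 0).filter
    (fun p => (PySem.List.slice l none (some p.1)).count p.2 == 1)

-- all indices of e in l, ascending
def odIdx (l : List Int) (e : Int) : List Int :=
  ((PySem.List.enumerate l 0).filter (fun q => q.2 == e)).map (·.1)

-- the dict B builds
def odPos (l : List Int) : PySem.Dict Int (List Int) :=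
  (PySem.List.enumerate l 0).foldl
    (fun (d : PySem.Dict Int (List Int)) p => d.modify p.2 [] (· ++ [p.1]))
    PySem.Dict.empty

-- ---- A side ----
lemma odA_loop (rest : List Int) : ∀ (pfx res : List Int),
    (rest.foldl
      (fun (st : List Int × PySem.Dict Int Int) e =>
        let res := if st.2.contains e && st.2.getD e 0 == 1 then st.1 ++ [e] else st.1
        (res, st.2.insert e (st.2.getD e 0 + 1)))
      (res, PySem.Dict.counter pfx)).1 = res ++ odSpec pfx rest := by
  induction rest with
  | nil => intro pfx res; simp [odSpec]
  | cons e rest ih =>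
    intro pfx res
    have hc : ((PySem.Dict.counter pfx).contains e && (PySem.Dict.counter pfx).getD e 0 == 1)
        = decide (pfx.count e = 1) := by
      rw [PySem.Dict.contains_counter, PySem.Dict.getD_counter]
      by_cases h : pfx.count e = 1
      · have : e ∈ pfx := List.count_pos_iff.mp (by omega)
        simp [h, this]
      · by_cases hm : e ∈ pfx <;> simp [h, hm]
    have hd : (PySem.Dict.counter pfx).insert e ((PySem.Dict.counter pfx).getD e 0 + 1)
        = PySem.Dict.counter (pfx ++ [e]) := by
      rw [← PySem.Dict.foldl_insert_getD_add_one_eq_counter,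
          ← PySem.Dict.foldl_insert_getD_add_one_eq_counter, List.foldl_append]
      rfl
    simp only [List.foldl_cons, hc, hd, odSpec]
    rw [ih]
    by_cases h : pfx.count e = 1 <;> simp [h]

-- second-occurrence entries, read off along the scan, are odSpec
lemma odT_map_snd (rest : List Int) : ∀ (pfx l : List Int), l = pfx ++ rest →
    ((PySem.List.enumerate rest (pfx.length : Int)).filter
        (fun p => (PySem.List.slice l none (some p.1)).count p.2 == 1)).map (·.2)
      = odSpec pfx rest := by
  induction rest with
  | nil => intro pfx l _; simp [PySem.List.enumerate_nil, odSpec]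
  | cons e rest ih =>
    intro pfx l hl
    rw [PySem.List.enumerate_cons]
    have hsl : PySem.List.slice l none (some (pfx.length : Int)) = pfx := by
      rw [PySem.List.slice_to]
      · simp [hl]
      · positivity
    have hrec := ih (pfx ++ [e]) l (by simp [hl])
    have hlen : (((pfx ++ [e]).length : Nat) : Int) = (pfx.length : Int) + 1 := by
      simp
    rw [hlen] at hrec
    simp only [List.filter_cons, hsl, odSpec]
    by_cases h : pfx.count e = 1
    · simp [h, hrec]
    · simp [h, hrec]

-- ---- B side ----

-- structure of the positions dict
lemma odPos_append (l : List Int) (x : Int) :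
    odPos (l ++ [x]) = (odPos l).modify x [] (· ++ [(l.length : Int)]) := by
  unfold odPos
  rw [PySem.List.enumerate_append, List.foldl_append]
  simp [PySem.List.enumerate_cons, PySem.List.enumerate_nil]

lemma odIdx_append (l : List Int) (x e : Int) :
    odIdx (l ++ [x]) e = odIdx l e ++ (if x = e then [(l.length : Int)] else []) := by
  unfold odIdx
  rw [PySem.List.enumerate_append, List.filter_append, List.map_append]
  congr 1
  rcases eq_or_ne x e with h | h <;>
    simp [PySem.List.enumerate_cons, PySem.List.enumerate_nil, h]

lemma odPos_getD (l : List Int) (e : Int) : (odPos l).getD e [] = odIdx l e := by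
  induction l using List.reverseRecOn with
  | nil => simp [odPos, odIdx, PySem.List.enumerate_nil]
  | append_singleton l x ih =>
    rw [odPos_append, odIdx_append, PySem.Dict.getD_modify]
    rcases eq_or_ne e x with h | h
    · subst h; simp [ih]
    · simp [h, Ne.symm h, ih]

lemma odPos_keys (l : List Int) : (odPos l).keys = PySem.Set.ofList l := by
  induction l using List.reverseRecOn with
  | nil => simp [odPos, PySem.List.enumerate_nil, PySem.Set.ofList_nil]
  | append_singleton l x ih =>
    rw [odPos_append, PySem.Set.ofList_append_singleton, PySem.Dict.keys_modify]
    by_cases h : (odPos l).contains x = true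
    · have hx : x ∈ PySem.Set.ofList l := by
        rw [← ih]; exact (PySem.Dict.contains_iff_mem_keys _ _).mp h
      rw [PySem.Dict.keys_insert_of_contains (odPos l) _ (h := h), ih, PySem.Set.add_of_mem hx]
    · have hx : x ∉ PySem.Set.ofList l := by
        rw [← ih]; intro hm
        exact h ((PySem.Dict.contains_iff_mem_keys _ _).mpr hm)
      rw [PySem.Dict.keys_insert_of_not_contains (odPos l) _ (h := by simpa using h), ih,
          PySem.Set.add_of_not_mem hx]

lemma odPos_nodup (l : List Int) : (odPos l).keys.Nodup := by
  rw [odPos_keys]; exact PySem.Set.nodup_ofList l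

lemma odIdx_length (l : List Int) (e : Int) : (odIdx l e).length = l.count e := by
  induction l using List.reverseRecOn with
  | nil => simp [odIdx, PySem.List.enumerate_nil]
  | append_singleton l x ih =>
    rw [odIdx_append]
    rcases eq_or_ne x e with h | h <;> simp [h, ih, List.count_append]

lemma odT_append (l : List Int) (x : Int) :
    odT (l ++ [x]) = odT l ++ (if l.count x = 1 then [((l.length : Int), x)] else []) := by
  unfold odT
  rw [PySem.List.enumerate_append, List.filter_append]
  congr 1
  · apply List.filter_congr
    intro p hp
    rcases (PySem.List.mem_enumerate_iff _ _ _).mp hp with ⟨k, hk, rfl⟩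
    have h1 : PySem.List.slice (l ++ [x]) none (some (0 + (k : Int))) = l.take k := by
      rw [PySem.List.slice_to]
      · simp [List.take_append_of_le_length (le_of_lt hk)]
      · positivity
    have h2 : PySem.List.slice l none (some (0 + (k : Int))) = l.take k := by
      rw [PySem.List.slice_to]
      · simp
      · positivity
    rw [h1, h2]
  · have h1 : PySem.List.slice (l ++ [x]) none (some ((l.length : Int))) = l := by
      rw [PySem.List.slice_to]
      · simp
      · positivity
    rcases eq_or_ne (l.count x) 1 with h | h
    · simp [PySem.List.enumerate_cons, PySem.List.enumerate_nil, h1, h]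
    · simp [PySem.List.enumerate_cons, PySem.List.enumerate_nil, h1, h]

-- membership characterisation of odT: exactly the (second index, element) pairs
lemma odT_mem (l : List Int) (p : Int × Int) :
    p ∈ odT l ↔ p.2 ∈ l ∧ 2 ≤ (odIdx l p.2).length ∧ p = ((odIdx l p.2).getD 1 0, p.2) := by
  obtain ⟨i, e⟩ := p
  induction l using List.reverseRecOn with
  | nil => simp [odT, odIdx, PySem.List.enumerate_nil]
  | append_singleton l x ih =>
    rw [odT_append, List.mem_append, ih]
    simp only [odIdx_append]
    rcases eq_or_ne x e with hx | hx
    · subst hx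
      have hlen := odIdx_length l x
      rcases Nat.lt_trichotomy (l.count x) 1 with hc | hc1 | hc
      · have h0 : l.count x = 0 := by omega
        have hv : odIdx l x = [] := List.eq_nil_of_length_eq_zero (by omega)
        have hnm : x ∉ l := by
          intro hm; exact absurd (List.count_pos_iff.mpr hm) (by omega)
        simp [hv, h0, hnm]
      · obtain ⟨a, hv⟩ : ∃ a, odIdx l x = [a] := List.length_eq_one_iff.mp (by omega)
        simp [hv, hc1, List.getD]
      · have h2 : 2 ≤ (odIdx l x).length := by omega
        have hne1 : l.count x ≠ 1 := by omega
        have hmem : x ∈ l := List.count_pos_iff.mp (by omega)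
        have hgd : ((odIdx l x) ++ [(l.length : Int)])[1]? = (odIdx l x)[1]? :=
          List.getElem?_append_left (by omega)
        have h1 : 1 ≤ (odIdx l x).length := by omega
        simp [hne1, h2, hmem, hgd, h1]
    · have hnew : ((i, e) ∉ (if l.count x = 1 then [((l.length : Int), x)] else [])) := by
        split_ifs <;> simp [Ne.symm hx]
      have hml : e ∈ l ++ [x] ↔ e ∈ l := by simp [Ne.symm hx]
      simp [if_neg hx, hnew, hml]

lemma odT_pairwise (l : List Int) : (odT l).Pairwise (fun p q => p.1 < q.1) := by
  exact List.Pairwise.sublist List.filter_sublist (PySem.List.pairwise_lt_enumerate l 0)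

-- the dict items are, up to order, the canonical (element, indices) pairs
lemma odPos_items_perm (l : List Int) :
    (odPos l).items.Perm ((PySem.Set.ofList l).map (fun k => (k, odIdx l k))) := by
  have hnd : (odPos l).keys.Nodup := odPos_nodup l
  have hitems : (odPos l).items.Nodup := List.Nodup.of_map _ hnd
  have hrhs : ((PySem.Set.ofList l).map (fun k => (k, odIdx l k))).Nodup :=
    (PySem.Set.nodup_ofList l).map (fun a b h => congrArg Prod.fst h)
  refine (List.perm_ext_iff_of_nodup hitems hrhs).mpr ?_
  rintro ⟨k, v⟩
  constructor
  · intro hq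
    have hk : k ∈ (odPos l).keys := PySem.Dict.mem_keys_of_mem_items _ hq
    have hv : (odPos l).getD k [] = v := PySem.Dict.getD_of_mem_items _ hq hnd _
    rw [odPos_getD] at hv
    rw [odPos_keys] at hk
    exact List.mem_map.mpr ⟨k, hk, by rw [hv]⟩
  · intro hq
    obtain ⟨k', hk', heq⟩ := List.mem_map.mp hq
    injection heq with h1 h2
    subst h1; subst h2
    have hk : k' ∈ (odPos l).keys := by rw [odPos_keys]; exact hk'
    have hc : (odPos l).contains k' = true := (PySem.Dict.contains_iff_mem_keys _ _).mpr hk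
    have hs : ((odPos l).get? k').isSome := by
      rw [← PySem.Dict.contains_eq_isSome_get?]; exact hc
    obtain ⟨w, hw⟩ := Option.isSome_iff_exists.mp hs
    have hgd : (odPos l).getD k' [] = w := PySem.Dict.getD_of_get?_eq_some _ _ hw
    rw [odPos_getD] at hgd
    apply PySem.Dict.mem_items_of_get?_eq_some
    rw [hw, ← hgd]

-- the pair list B builds is a permutation of odT
lemma odPairs_perm (l : List Int) :
    (odT l).Perm (((odPos l).items.filter (fun q => 2 ≤ q.2.length)).map
      (fun q => (q.2.getD 1 0, q.1))) := by
  have hperm : (((odPos l).items.filter (fun q => 2 ≤ q.2.length)).map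
      (fun q => (q.2.getD 1 0, q.1))).Perm
      ((((PySem.Set.ofList l).map (fun k => (k, odIdx l k))).filter
        (fun q => 2 ≤ q.2.length)).map (fun q => (q.2.getD 1 0, q.1))) :=
    ((odPos_items_perm l).filter _).map _
  have hQ : ((((PySem.Set.ofList l).map (fun k => (k, odIdx l k))).filter
        (fun q => 2 ≤ q.2.length)).map (fun q => (q.2.getD 1 0, q.1)))
      = ((PySem.Set.ofList l).filter (fun k => 2 ≤ (odIdx l k).length)).map
        (fun k => ((odIdx l k).getD 1 0, k)) := by
    rw [List.filter_map, List.map_map]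
    rfl
  rw [hQ] at hperm
  refine (List.perm_ext_iff_of_nodup ?_ ?_).mpr ?_ |>.trans hperm.symm
  · exact (odT_pairwise l).imp (fun {a b} hlt heq => by
      rw [heq] at hlt; exact lt_irrefl _ hlt)
  · refine List.Nodup.map (fun a b h => congrArg Prod.snd h) ?_
    exact (PySem.Set.nodup_ofList l).filter _
  · rintro ⟨i, e⟩
    rw [odT_mem]
    constructor
    · rintro ⟨hmem, hlen, heq⟩
      refine List.mem_map.mpr ⟨e, List.mem_filter.mpr ⟨?_, by simpa using hlen⟩, ?_⟩
      · exact (PySem.Set.mem_ofList _ _).mpr hmem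
      · exact heq.symm
    · intro hq
      obtain ⟨k, hk, heq⟩ := List.mem_map.mp hq
      obtain ⟨hk1, hk2⟩ := List.mem_filter.mp hk
      injection heq with h1 h2
      subst h1; subst h2
      exact ⟨(PySem.Set.mem_ofList _ _).mp hk1, by simpa using hk2, rfl⟩

-- ===== VERDICT (by name: the statement is the Claim_ definition above) =====
theorem only_dupe_spec : Claim_equal_only_dupe := by
  intro l _
  show only_dupe l = only_dupe_alt l
  have hA : only_dupe l = odSpec [] l := odA_loop l [] []
  have hsorted : PySem.List.sorted (((odPos l).items.filter (fun q => 2 ≤ q.2.length)).map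
      (fun q => (q.2.getD 1 0, q.1))) (fun p => p.1) = odT l :=
    PySem.List.sorted_eq_of_perm_of_pairwise_lt _ _ _ (odPairs_perm l) (odT_pairwise l)
  have hB : only_dupe_alt l = (odT l).map (·.2) := by
    unfold only_dupe_alt
    exact congrArg (List.map (·.2)) hsorted
  have hT : (odT l).map (·.2) = odSpec [] l := odT_map_snd l [] l rfl
  rw [hA, hB, hT]
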